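-- pv_equiv track=rewrite | github.com/kondyskrzysiek/BIT-kolo-naukowe | ćwiczenia 2/cwiczenia/task_6.py | get_text_statictics
-- ===== SOURCE A (Python) =====
-- from operator import itemgetter
--
-- def get_text_statictics(text, k):
--     words = text.split()
--     counter = {}
--     for word in words:
--         counter[word] = counter.get(word, 0) + 1
--
--     counter = list(counter.items())
--     counter.sort(key=itemgetter(1),reverse=True)
--     return counter[:k] , len(words)
-- ===== SOURCE B (Python) =====
-- def get_text_statictics(text, k):
--     words = text.split()
--     counter = {}
--     for word in words:
--         counter[word] = counter.get(word, 0) + 1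
--     buckets = {}
--     for word, count in counter.items():
--         buckets.setdefault(count, []).append((word, count))
--     result = []
--     for c in range(max(counter.values(), default=0), 0, -1):
--         result.extend(buckets.get(c, []))
--     return result[:k], len(words)
-- ===== Notes on version B (the rewrite author's own statement) =====
-- stated objective: alternative
-- what changed: The descending stable sort of the (word, count) items is replaced by a counting/bucket pass: pairs are appended to buckets keyed by their count in dict-insertion order and emitted from the maximal count down to 1, reproducing the stable order without a comparison sort.
import Mathlib
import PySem

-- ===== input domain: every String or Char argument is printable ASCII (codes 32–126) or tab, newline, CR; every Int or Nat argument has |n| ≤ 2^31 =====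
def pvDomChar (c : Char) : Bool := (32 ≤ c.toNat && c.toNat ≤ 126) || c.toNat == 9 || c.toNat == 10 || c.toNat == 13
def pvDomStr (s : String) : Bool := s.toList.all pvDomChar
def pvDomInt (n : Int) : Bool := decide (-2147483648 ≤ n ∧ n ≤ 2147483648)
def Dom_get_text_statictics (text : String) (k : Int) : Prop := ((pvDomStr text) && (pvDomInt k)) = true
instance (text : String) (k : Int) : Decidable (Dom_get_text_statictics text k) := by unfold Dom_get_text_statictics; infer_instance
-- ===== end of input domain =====

-- B replaces the comparison sort of the (word, count) items by bucket emission (buckets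
-- indexed by count, emitted from the maximal count down to 1), reproducing the stable
-- descending-by-count, insertion-order-tie-break result without sorting.

-- ===== PORT A =====
-- A: split; count words into a dict; stable-sort items by count descending; slice [:k]
def get_text_statictics (text : String) (k : Int) : (List (String × Int)) × Int :=
  let words := PySem.Str.split₀ text
  let counter := words.foldl (fun d word => d.insert word (d.getD word 0 + 1))
      (PySem.Dict.empty : PySem.Dict String Int)
  let counterL := counter.items
  let sortedL := PySem.List.sorted counterL (fun p => p.2) true
  (PySem.List.slice sortedL none (some k), PySem.List.len words)

-- ===== PORT B =====
-- B: same counting dict; then buckets[count] lists filled in dict order, emitted from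
-- max(counter.values(), default=0) down to 1; slice [:k]
def get_text_statictics_alt (text : String) (k : Int) : (List (String × Int)) × Int :=
  let words := PySem.Str.split₀ text
  let counter := words.foldl (fun d word => d.insert word (d.getD word 0 + 1))
      (PySem.Dict.empty : PySem.Dict String Int)
  let buckets := counter.items.foldl
      (fun b p => b.modify p.2 [] (fun t => t ++ [p]))
      (PySem.Dict.empty : PySem.Dict Int (List (String × Int)))
  let maxc := PySem.List.maxD counter.values (fun v => v) 0
  let result := (PySem.List.pyRange maxc 0 (-1)).foldl (fun r c => r ++ buckets.getD c []) []
  (PySem.List.slice result none (some k), PySem.List.len words)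

-- ===== PRECONDITION & SPEC =====
def Spec_get_text_statictics (text : String) (k : Int) (out : (List (String × Int)) × Int) : Prop := out = get_text_statictics_alt text k
instance (text : String) (k : Int) (out : (List (String × Int)) × Int) : Decidable (Spec_get_text_statictics text k out) := by unfold Spec_get_text_statictics; infer_instance

-- ===== CLAIM (what is proved, stated in full; the proofs are below) =====
def Claim_equal_get_text_statictics : Prop := ∀ (text : String) (k : Int), Dom_get_text_statictics text k → Spec_get_text_statictics text k (get_text_statictics text k)

-- ===== LEMMAS AND PROOFS =====

-- insertBy walks past a prefix it does not insert into
theorem pv_insertBy_skip {α : Type} (before : α → α → Bool) (x : α) (l r : List α)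
    (h : ∀ y ∈ l, before x y = false) :
    PySem.List.insertBy before x (l ++ r) = l ++ PySem.List.insertBy before x r := by
  induction l with
  | nil => simp
  | cons a as ih =>
      have ha : before x a = false := h a (by simp)
      simp only [List.cons_append, PySem.List.insertBy, ha, Bool.false_eq_true, if_false]
      rw [ih (fun y hy => h y (by simp [hy]))]

-- insertBy puts x in front when it goes before everything
theorem pv_insertBy_front {α : Type} (before : α → α → Bool) (x : α) (r : List α)
    (h : ∀ y ∈ r, before x y = true) :
    PySem.List.insertBy before x r = x :: r := by
  cases r with
  | nil => rfl
  | cons a as => simp [PySem.List.insertBy, h a (by simp)]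

-- inserting x into a list bucketed by strictly decreasing key values appends x to its bucket
theorem pv_insert_into_buckets {α : Type} (key : α → Int) (x : α) (cs : List Int)
    (f : Int → List α)
    (hf : ∀ c ∈ cs, ∀ y ∈ f c, key y = c)
    (hs : cs.Pairwise (· > ·))
    (hx : key x ∈ cs) :
    PySem.List.insertBy (fun a b => decide (key b < key a)) x (cs.flatMap f)
      = cs.flatMap (fun c => f c ++ if key x = c then [x] else []) := by
  induction cs with
  | nil => simp at hx
  | cons c cs ih =>
      have hlt : ∀ c' ∈ cs, c' < c := fun c' h => List.rel_of_pairwise_cons hs h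
      by_cases hc : key x = c
      · rw [List.flatMap_cons,
          pv_insertBy_skip _ _ _ _ (fun y hy => by
            have := hf c (by simp) y hy
            simp [this, hc]),
          pv_insertBy_front _ _ _ (fun y hy => by
            obtain ⟨c', hc', hy'⟩ := List.mem_flatMap.mp hy
            have h1 := hf c' (by simp [hc']) y hy'
            have h2 := hlt c' hc'
            simp [h1, hc]; omega)]
        rw [List.flatMap_cons, if_pos hc]
        have hrest : (cs.flatMap fun c' => f c' ++ if key x = c' then [x] else []) = cs.flatMap f := by
          apply List.flatMap_congr
          intro c' hc'
          have h2 := hlt c' hc'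
          have h3 : ¬ (key x = c') := by omega
          simp [h3]
        rw [hrest]
        simp
      · have hx' : key x ∈ cs := by
          rcases List.mem_cons.mp hx with h | h
          · exact absurd h hc
          · exact h
        have hxc : key x < c := hlt _ hx'
        rw [List.flatMap_cons,
          pv_insertBy_skip _ _ _ _ (fun y hy => by
            have := hf c (by simp) y hy
            simp [this]; omega),
          ih (fun c' h' y hy => hf c' (by simp [h']) y hy)
             (List.Pairwise.of_cons hs) hx']
        rw [List.flatMap_cons]
        simp [hc]

-- Python's stable reverse sort by key equals bucket concatenation over a
-- strictly decreasing list of key values covering all keys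
theorem pv_sorted_eq_flatMap_filter {α : Type} (key : α → Int) (cs : List Int)
    (hs : cs.Pairwise (· > ·)) :
    ∀ xs : List α, (∀ p ∈ xs, key p ∈ cs) →
      PySem.List.sorted xs key true
        = cs.flatMap (fun c => xs.filter (fun p => decide (key p = c))) := by
  intro xs
  induction xs using List.reverseRecOn with
  | nil => intro _; simp [PySem.List.sorted]
  | append_singleton xs x ih =>
      intro h
      rw [PySem.List.sorted_rev_eq_foldl_insertBy, List.foldl_append, List.foldl_cons,
        List.foldl_nil, ← PySem.List.sorted_rev_eq_foldl_insertBy,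
        ih (fun p hp => h p (by simp [hp])),
        pv_insert_into_buckets key x cs _
          (fun c _ y hy => by simpa using (List.of_mem_filter hy))
          hs (h x (by simp))]
      apply List.flatMap_congr
      intro c _
      by_cases hxc : key x = c <;> simp [List.filter_append, hxc]

-- the bucket-building fold looked up at c yields the elements with key value c, in order
theorem pv_buckets_getD (l : List (String × Int)) (d : PySem.Dict Int (List (String × Int)))
    (c : Int) :
    ((l.foldl (fun b p => b.modify p.2 [] (fun t => t ++ [p])) d).getD c [])
      = d.getD c [] ++ l.filter (fun p => decide (p.2 = c)) := by
  induction l generalizing d with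
  | nil => simp
  | cons p l ih =>
      rw [List.foldl_cons, ih]
      simp only [PySem.Dict.modify, PySem.Dict.getD_insert]
      by_cases h : p.2 = c
      · simp [h]
      · simp [h, Ne.symm h]

-- a left fold whose step keeps `some` cannot end in `none`
theorem pv_foldl_some_eq_none_false {α β : Type} (f : Option β → α → Option β)
    (hf : ∀ b x, ∃ b', f (some b) x = some b') :
    ∀ (l : List α) (b : β), l.foldl f (some b) = none → False := by
  intro l
  induction l with
  | nil => intro b h; simp at h
  | cons a l ih =>
      intro b h
      rw [List.foldl_cons] at h
      obtain ⟨b', hb'⟩ := hf b a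
      rw [hb'] at h
      exact ih b' h

-- every member is bounded by maxD with identity key
theorem pv_le_maxD_self (vs : List Int) (v : Int) (hv : v ∈ vs) :
    v ≤ PySem.List.maxD vs (fun x => x) 0 := by
  cases hm : PySem.List.max? vs (fun x => x) with
  | none =>
      exfalso
      rw [PySem.List.max?] at hm
      cases vs with
      | nil => simp at hv
      | cons a l =>
          rw [List.foldl_cons] at hm
          exact pv_foldl_some_eq_none_false _
            (fun b x => by dsimp only; split <;> exact ⟨_, rfl⟩) l a hm
  | some m =>
      have := PySem.List.max?_isMax hm v hv
      simpa [PySem.List.maxD, hm] using this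

-- range(m, 0, -1) is the strictly decreasing list m, m-1, …, 1
theorem pv_pyRange_desc (m : Int) :
    PySem.List.pyRange m 0 (-1) = (List.range m.toNat).map (fun k : Nat => m - (k : Int)) := by
  rw [PySem.List.pyRange]
  rw [if_neg (by norm_num : ¬ (-1 : Int) = 0)]
  dsimp only
  rw [if_neg (by norm_num : ¬ (0 : Int) < -1)]
  have hc : (if (0:Int) < m then ((m - 0 + - -1 - 1) / - -1).toNat else 0) = m.toNat := by
    split_ifs with h
    · norm_num
    · omega
  rw [hc]
  exact List.map_congr_left (fun k _ => by ring)

theorem pv_pairwise_desc (m : Int) :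
    ((List.range m.toNat).map (fun k : Nat => m - (k : Int))).Pairwise (· > ·) := by
  refine List.pairwise_map.mpr (List.pairwise_lt_range.imp ?_)
  intro a b h
  omega

theorem pv_mem_desc (m c : Int) (h1 : 1 ≤ c) (h2 : c ≤ m) :
    c ∈ (List.range m.toNat).map (fun k : Nat => m - (k : Int)) := by
  refine List.mem_map.mpr ⟨(m - c).toNat, List.mem_range.mpr ?_, ?_⟩ <;> omega

-- the word-count fold of both ports is Counter(words)
theorem pv_counter_fold_eq (words : List String) :
    words.foldl (fun d word => d.insert word (d.getD word 0 + 1))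
        (PySem.Dict.empty : PySem.Dict String Int)
      = PySem.Dict.counter words := by
  rw [PySem.Dict.counter_eq_foldl]
  rfl

-- main list equality: the stable descending sort of Counter(words).items equals
-- B's bucket emission from max count down to 1
theorem pv_result_eq (words : List String) :
    PySem.List.sorted (PySem.Dict.counter words).items (fun p => p.2) true
      = (PySem.List.pyRange
          (PySem.List.maxD (PySem.Dict.counter words).values (fun v => v) 0) 0 (-1)).foldl
          (fun r c => r ++
            (((PySem.Dict.counter words).items.foldl
                (fun b p => b.modify p.2 [] (fun t => t ++ [p]))
                (PySem.Dict.empty : PySem.Dict Int (List (String × Int)))).getD c [])) [] := by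
  set items := (PySem.Dict.counter words).items with hitems
  set maxc := PySem.List.maxD (PySem.Dict.counter words).values (fun v => v) 0 with hmaxc
  have hbuck : ∀ c : Int,
      ((items.foldl (fun b p => b.modify p.2 [] (fun t => t ++ [p]))
          (PySem.Dict.empty : PySem.Dict Int (List (String × Int)))).getD c [])
        = items.filter (fun p => decide (p.2 = c)) := by
    intro c
    rw [pv_buckets_getD]
    simp
  have hmem : ∀ p ∈ items, p.2 ∈ (List.range maxc.toNat).map (fun k : Nat => maxc - (k : Int)) := by
    intro p hp
    have hp' := hp
    rw [hitems, PySem.Dict.items_counter] at hp'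
    obtain ⟨w, hw, hwp⟩ := List.mem_map.mp hp'
    have hwmem : w ∈ words := (PySem.Set.mem_ofList words w).mp hw
    have hsnd : p.2 = (words.count w : Int) := by rw [← hwp]
    have h1 : 1 ≤ p.2 := by
      rw [hsnd]
      exact_mod_cast List.count_pos_iff.mpr hwmem
    have h2 : p.2 ≤ maxc := by
      apply pv_le_maxD_self
      show p.2 ∈ (PySem.Dict.counter words).values
      simp only [PySem.Dict.values]
      exact List.mem_map.mpr ⟨p, hp, rfl⟩
    exact pv_mem_desc maxc p.2 h1 h2
  rw [PySem.List.foldl_append_eq_flatMap, List.nil_append, pv_pyRange_desc]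
  calc PySem.List.sorted items (fun p => p.2) true
      = ((List.range maxc.toNat).map (fun k : Nat => maxc - (k : Int))).flatMap
          (fun c => items.filter (fun p => decide (p.2 = c))) :=
        pv_sorted_eq_flatMap_filter (fun p => p.2)
          ((List.range maxc.toNat).map (fun k : Nat => maxc - (k : Int)))
          (pv_pairwise_desc maxc) items hmem
    _ = _ := by
        apply List.flatMap_congr
        intro c _
        rw [hbuck]

-- ===== VERDICT (by name: the statement is the Claim_ definition above) =====
theorem get_text_statictics_spec : Claim_equal_get_text_statictics := by
  intro text k _
  unfold Spec_get_text_statictics get_text_statictics get_text_statictics_alt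
  simp only [pv_counter_fold_eq]
  rw [pv_result_eq]
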